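-- pv_equiv track=rewrite | github.com/alxwen711/contestSubmissionArchive | codeforces/live contests/2024-1/934/a.py | f
-- ===== SOURCE A (Python) =====
-- def f(h,x):
--     ar = list()
--     for i in range(x):
--         ar.append(h[i])
--     ar.sort()
--     for j in range(x):
--         if ar[j] <= j: return False
--     return True
-- ===== SOURCE B (Python) =====
-- def f(h, x):
--     if x <= 0:
--         return True
--     n = x
--     cnt = [0] * (n + 1)
--     for i in range(n):
--         v = h[i]
--         b = 0 if v < 0 else (n if v > n else v)
--         cnt[b] += 1
--     run = 0
--     for j in range(n):
--         run += cnt[j]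
--         if run > j:
--             return False
--     return True
-- ===== Notes on version B (the rewrite author's own statement) =====
-- stated objective: alternative
-- what changed: Replaces sort-the-prefix-then-scan with a comparison-free bucket-count pass: tally clamped values into x+1 buckets, then check via running prefix sums that at most j elements are <= j for every j < x; asymptotically O(x) vs O(x log x) but not measurably faster in CPython, where A's sort runs in C.
import Mathlib
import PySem

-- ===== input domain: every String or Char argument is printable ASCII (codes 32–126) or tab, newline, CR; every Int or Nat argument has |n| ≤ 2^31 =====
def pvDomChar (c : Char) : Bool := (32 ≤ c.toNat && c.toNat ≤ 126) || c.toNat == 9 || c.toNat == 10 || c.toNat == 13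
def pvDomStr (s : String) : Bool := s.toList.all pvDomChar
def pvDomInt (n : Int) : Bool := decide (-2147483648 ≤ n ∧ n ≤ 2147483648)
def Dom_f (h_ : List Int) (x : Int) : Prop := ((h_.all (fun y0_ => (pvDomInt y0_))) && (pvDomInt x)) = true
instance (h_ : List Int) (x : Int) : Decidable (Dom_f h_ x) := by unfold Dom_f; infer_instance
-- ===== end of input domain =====

-- B replaces A's sort-then-scan by a bucket-counting alternative: prefix sums check that at most j elements are ≤ j, for every j < x; no sort.

-- ===== PORT A =====
-- ar = []; for i in range(x): ar.append(h[i]); ar.sort(); for j in range(x): if ar[j] <= j: return False; return True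
def f (h_ : List Int) (x : Int) : Bool :=
  let ar := (PySem.List.pyRange 0 x 1).foldl
    (fun acc i => acc ++ [PySem.List.pyGetD h_ i 0]) []
  let ar := PySem.List.sorted ar (fun v => v) false
  (PySem.List.pyRange 0 x 1).all (fun j => !(PySem.List.pyGetD ar j 0 ≤ j))

-- ===== PORT B =====
-- bucket index of v: 0 if v < 0 else (n if v > n else v), with n = x
def pvClamp (x : Int) (v : Int) : Nat :=
  if v < 0 then 0 else if v > x then x.toNat else v.toNat

def f_alt (h_ : List Int) (x : Int) : Bool :=
  if x ≤ 0 then true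
  else
    let cnt := (PySem.List.pyRange 0 x 1).foldl
      (fun c i =>
        let v := PySem.List.pyGetD h_ i 0
        let b := pvClamp x v
        c.set b (c.getD b 0 + 1))
      (List.replicate (x.toNat + 1) (0 : Int))
    let r := (PySem.List.pyRange 0 x 1).foldl
      (fun st j =>
        let run := st.1 + PySem.List.pyGetD cnt j 0
        (run, st.2 && !(run > j)))
      ((0 : Int), true)
    r.2

-- ===== PRECONDITION & SPEC =====
-- Pre_f excludes exactly x > len(h), where A raises IndexError on h[i] (B raises there too).
def Pre_f (h_ : List Int) (x : Int) : Prop := x ≤ (h_.length : Int)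
instance (h_ : List Int) (x : Int) : Decidable (Pre_f h_ x) := by unfold Pre_f; infer_instance
def pvWitness_f : List Int × Int := ([3, 1, 2], 2)

def Spec_f (h_ : List Int) (x : Int) (out : Bool) : Prop := out = f_alt h_ x
instance (h_ : List Int) (x : Int) (out : Bool) : Decidable (Spec_f h_ x out) := by unfold Spec_f; infer_instance

-- ===== CLAIM (what is proved, stated in full; the proofs are below) =====
def Claim_equal_f : Prop := ∀ (h_ : List Int) (x : Int), Dom_f h_ x → Pre_f h_ x → Spec_f h_ x (f h_ x)

-- ===== LEMMAS AND PROOFS =====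

-- A's first loop builds h[:x]
theorem pv_ar_eq (h_ : List Int) (x : Int) (hx : 0 ≤ x) (hle : x ≤ (h_.length : Int)) :
    (PySem.List.pyRange 0 x 1).foldl (fun acc i => acc ++ [PySem.List.pyGetD h_ i 0]) []
      = h_.take x.toNat := by
  rw [PySem.List.foldl_append_singleton_eq_map, List.nil_append,
    PySem.List.pyRange_one, List.map_map]
  apply List.ext_getElem
  · simp only [List.length_map, List.length_range, List.length_take]; omega
  · intro k hk1 hk2
    simp only [List.getElem_map, List.getElem_range, Function.comp_apply]
    rw [show ((0:Int) + (k:Int)) = (k:Int) by ring]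
    rw [PySem.List.pyGetD_natCast]
    simp only [List.length_map, List.length_range] at hk1
    rw [List.getElem_take]
    rw [List.getD_eq_getElem?_getD, List.getElem?_eq_getElem (by omega)]
    rfl

-- a fold over range(x) reading h[i] is a fold over h[:x]
theorem pv_foldl_take {α : Type} (h_ : List Int) (x : Int) (hx : 0 ≤ x) (hle : x ≤ (h_.length : Int))
    (g : α → Int → α) (init : α) :
    (PySem.List.pyRange 0 x 1).foldl (fun c i => g c (PySem.List.pyGetD h_ i 0)) init
      = (h_.take x.toNat).foldl g init := by
  set t := h_.take x.toNat with ht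
  have hlen : ((t).length : Int) = x := by
    simp [ht, List.length_take]; omega
  have hmem : ∀ (c : α) (i : Int), i ∈ PySem.List.pyRange 0 x 1 →
      g c (PySem.List.pyGetD h_ i 0) = g c (PySem.List.pyGetD t i 0) := by
    intro c i hi
    rw [PySem.List.mem_pyRange_one] at hi
    congr 1
    obtain ⟨k, hk, rfl⟩ : ∃ k : Nat, (k : Int) < x ∧ i = (k : Int) :=
      ⟨i.toNat, by omega, by omega⟩
    rw [PySem.List.pyGetD_natCast, PySem.List.pyGetD_natCast]
    have hk2 : k < t.length := by omega
    have hk3 : k < h_.length := by omega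
    rw [List.getD_eq_getElem?_getD, List.getElem?_eq_getElem hk3,
      List.getD_eq_getElem?_getD (l := t), List.getElem?_eq_getElem hk2]
    simp [ht, List.getElem_take]
  refine (PySem.List.foldl_congr_mem _ _ _ _ hmem).trans ?_
  rw [show PySem.List.pyRange 0 x 1 = PySem.List.pyRange 0 ((t.length : Int)) 1 by rw [hlen]]
  exact PySem.List.foldl_pyRange_zero_pyGetD' _ _ _ _

-- in a sorted list, s[k] ≤ t iff more than k elements are ≤ t
theorem pv_sorted_count (s : List Int) (hs : s.Pairwise (· ≤ ·)) (t : Int) : ∀ (k : Nat)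
    (hk : k < s.length),
    (s[k] ≤ t ↔ (k : Int) < s.countP (fun v => decide (v ≤ t))) := by
  induction s with
  | nil => intro k hk; simp at hk
  | cons a rest ih =>
    rw [List.pairwise_cons] at hs
    obtain ⟨ha, hrest⟩ := hs
    intro k hk
    by_cases hat : a ≤ t
    · rw [List.countP_cons_of_pos (p := fun v => decide (v ≤ t)) (by simpa using hat)]
      cases k with
      | zero => simpa using hat
      | succ k' =>
        simp only [List.getElem_cons_succ]
        rw [ih hrest k' (by simpa using hk)]
        push_cast; omega
    · have h0 : rest.countP (fun v => decide (v ≤ t)) = 0 := by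
        rw [List.countP_eq_zero]
        intro v hv
        simp only [decide_eq_true_eq]
        intro hvt; exact hat (le_trans (ha v hv) hvt)
      rw [List.countP_cons_of_neg (p := fun v => decide (v ≤ t)) (by simpa using hat), h0]
      cases k with
      | zero => simpa using hat
      | succ k' =>
        simp only [List.getElem_cons_succ]
        constructor
        · intro hle
          exact absurd (le_trans (ha _ (List.getElem_mem _)) hle) hat
        · intro hlt; omega

-- B's bucket array holds the clamped counts
theorem pv_cnt_getD (x : Int) (xs : List Int) : ∀ (c0 : List Int),
    (∀ v : Int, pvClamp x v < c0.length) → ∀ (b : Nat),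
    (xs.foldl (fun c v => c.set (pvClamp x v) (c.getD (pvClamp x v) 0 + 1)) c0).getD b 0
      = c0.getD b 0 + (xs.map (pvClamp x)).count b := by
  induction xs with
  | nil => intro c0 _ b; simp
  | cons v rest ih =>
    intro c0 hlen b
    simp only [List.foldl_cons, List.map_cons, List.count_cons]
    rw [ih _ (by intro w; rw [List.length_set]; exact hlen w) b]
    rcases eq_or_ne (pvClamp x v) b with he | hne
    · subst he
      rw [List.getD_eq_getElem?_getD, List.getElem?_set_self (hlen v),
        List.getD_eq_getElem?_getD (l := c0)]
      rw [List.getElem?_eq_getElem (hlen v)]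
      simp
      omega
    · rw [List.getD_eq_getElem?_getD, List.getElem?_set_ne hne,
        ← List.getD_eq_getElem?_getD]
      simp [hne]

def pvS (cnt : List Int) (m : Nat) : Int :=
  ((List.range m).map (fun b => cnt.getD b 0)).sum

-- B's second loop computes prefix sums and checks them all
theorem pv_loop2 (cnt : List Int) (m : Nat) :
    (PySem.List.pyRange 0 (m : Int) 1).foldl
      (fun st j => (st.1 + PySem.List.pyGetD cnt j 0,
        st.2 && !decide (st.1 + PySem.List.pyGetD cnt j 0 > j)))
      ((0 : Int), true)
    = (pvS cnt m, decide (∀ j : Nat, j < m → pvS cnt (j + 1) ≤ (j : Int))) := by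
  induction m with
  | zero => simp [PySem.List.pyRange_one_eq_nil, pvS]
  | succ m ih =>
    rw [show ((m + 1 : Nat) : Int) = (m : Int) + 1 by push_cast; ring]
    rw [PySem.List.pyRange_one_succ_right (by positivity)]
    rw [List.foldl_append, ih]
    simp only [List.foldl_cons, List.foldl_nil]
    have h1 : pvS cnt (m + 1) = pvS cnt m + cnt.getD m 0 := by
      simp [pvS, List.range_succ]
    have h2 : PySem.List.pyGetD cnt (m : Int) 0 = cnt.getD m 0 :=
      PySem.List.pyGetD_natCast _ _ _
    rw [h2, ← h1]
    refine Prod.ext rfl ?_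
    simp only [← decide_not, ← Bool.decide_and]
    apply decide_eq_decide.mpr
    constructor
    · rintro ⟨hp, hl⟩ j hj
      rcases Nat.lt_succ_iff_lt_or_eq.mp hj with h | rfl
      · exact hp j h
      · omega
    · intro hp
      exact ⟨fun j hj => hp j (by omega), by have := hp m (by omega); omega⟩

theorem pv_countP_succ (l : List Nat) (m : Nat) :
    l.countP (fun a => decide (a < m + 1))
      = l.countP (fun a => decide (a < m)) + l.count m := by
  induction l with
  | nil => simp
  | cons a l ih =>
    simp only [List.countP_cons, List.count_cons, ih, decide_eq_true_eq, beq_iff_eq]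
    split_ifs <;> omega

theorem pv_sum_count (l : List Nat) (m : Nat) :
    ((List.range m).map (fun b => (l.count b : Int))).sum
      = (l.countP (fun a => decide (a < m)) : Int) := by
  induction m with
  | zero => simp
  | succ m ih =>
    rw [List.range_succ, List.map_append, List.sum_append, ih, pv_countP_succ]
    push_cast; simp

theorem pv_clamp_le (x v : Int) (j : Nat) (hj : (j : Int) < x) :
    (pvClamp x v ≤ j ↔ v ≤ (j : Int)) := by
  unfold pvClamp; split_ifs <;> omega

-- ===== VERDICT (by name: the statement is the Claim_ definition above) =====
theorem f_spec : Claim_equal_f := by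
  intro h_ x _ hpre
  unfold Pre_f at hpre
  unfold Spec_f f f_alt
  by_cases hx : x ≤ 0
  · rw [if_pos hx, PySem.List.pyRange_one_eq_nil hx]
    simp
  · rw [not_le] at hx
    rw [if_neg (by omega)]
    set n := x.toNat with hn
    have hxn : (n : Int) = x := by omega
    have hnh : n ≤ h_.length := by omega
    simp only []
    rw [pv_ar_eq h_ x (by omega) hpre]
    have hfold := pv_foldl_take h_ x (by omega) hpre
      (fun c v => c.set (pvClamp x v) (c.getD (pvClamp x v) 0 + 1))
      (List.replicate (n + 1) (0 : Int))
    simp only [] at hfold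
    rw [hfold]
    set ar := h_.take n with har
    have hlar : ar.length = n := by simp [har]; omega
    set s := PySem.List.sorted ar (fun v => v) false with hs
    have hslen : s.length = n := by rw [hs, PySem.List.length_sorted, hlar]
    have hspair : s.Pairwise (· ≤ ·) := PySem.List.sorted_pairwise ar (fun v => v)
    set cnt := ar.foldl
      (fun c v => c.set (pvClamp x v) (c.getD (pvClamp x v) 0 + 1))
      (List.replicate (n + 1) (0 : Int)) with hcnt
    rw [show PySem.List.pyRange 0 x 1 = PySem.List.pyRange 0 ((n : Int)) 1 by rw [hxn]]
    rw [pv_loop2 cnt n]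
    -- both sides are now decidable statements about s and cnt
    have hcntD : ∀ b : Nat, cnt.getD b 0 = ((ar.map (pvClamp x)).count b : Int) := by
      intro b
      rw [hcnt, pv_cnt_getD x ar (List.replicate (n + 1) (0 : Int))
        (by intro v; rw [List.length_replicate]; unfold pvClamp; split_ifs <;> omega) b]
      simp
    have hkey : ∀ j : Nat, j < n → pvS cnt (j + 1)
        = (s.countP (fun v => decide (v ≤ (j : Int))) : Int) := by
      intro j hj
      have hjx : (j : Int) < x := by omega
      unfold pvS
      rw [List.map_congr_left (fun b _ => hcntD b), pv_sum_count]
      rw [List.countP_map]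
      have hcc : ar.countP ((fun a => decide (a < j + 1)) ∘ pvClamp x)
          = ar.countP (fun v => decide (v ≤ (j : Int))) := by
        apply List.countP_congr
        intro v _
        simp only [Function.comp_apply, decide_eq_true_eq]
        constructor
        · intro hlt; exact (pv_clamp_le x v j hjx).mp (by omega)
        · intro hle; have := (pv_clamp_le x v j hjx).mpr hle; omega
      rw [hcc]
      congr 1
      exact ((PySem.List.sorted_perm ar (fun v => v) false).countP_eq _).symm
    rw [Bool.eq_iff_iff]
    rw [List.all_eq_true]
    constructor
    · intro hall
      simp only [decide_eq_true_eq]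
      intro j hj
      have hjmem : ((j : Int)) ∈ PySem.List.pyRange 0 ((n : Int)) 1 := by
        rw [PySem.List.mem_pyRange_one]; omega
      have := hall _ hjmem
      rw [PySem.List.pyGetD_natCast] at this
      rw [List.getD_eq_getElem?_getD, List.getElem?_eq_getElem (by omega : j < s.length)] at this
      simp only [Option.getD_some, Bool.not_eq_true', decide_eq_false_iff_not] at this
      rw [pv_sorted_count s hspair _ j (by omega)] at this
      rw [hkey j hj]
      omega
    · intro hdec i hi
      rw [PySem.List.mem_pyRange_one] at hi
      simp only [decide_eq_true_eq] at hdec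
      obtain ⟨j, hj, rfl⟩ : ∃ j : Nat, j < n ∧ i = (j : Int) :=
        ⟨i.toNat, by omega, by omega⟩
      have := hdec j hj
      rw [hkey j hj] at this
      rw [PySem.List.pyGetD_natCast]
      rw [List.getD_eq_getElem?_getD, List.getElem?_eq_getElem (by omega : j < s.length)]
      simp only [Option.getD_some, Bool.not_eq_true', decide_eq_false_iff_not]
      rw [pv_sorted_count s hspair _ j (by omega)]
      omega
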